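-- pv_equiv track=rewrite | github.com/ufkapano/graphtheory | graphtheory/permutations/permtools.py | make_path_perm
-- ===== SOURCE A (Python) =====
-- def swap(L, i, j):
--     L[i], L[j] = L[j], L[i]
--
-- def make_path_perm(n):
--     """Return a perm for P_n path graph."""
--     if n < 1:
--         raise ValueError("no nodes")
--     elif n == 1:
--         return [0]
--     elif n == 2:
--         return [1, 0]
--     else:
--         perm = make_path_perm(n-2)
--         perm.append(n-2)
--         perm.append(n-1)
--         swap(perm, -2, -1)
--         swap(perm, -3, -2)
--         return perm
-- ===== SOURCE B (Python) =====
-- def make_path_perm(n):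
--     """Return a perm for P_n path graph."""
--     if n < 1:
--         raise ValueError("no nodes")
--     if n == 1:
--         return [0]
--     r = (n - 1) % 2
--     perm = []
--     for i in range(n):
--         if i % 2 == r:
--             perm.append(n - 2 if i == n - 1 else i + 2)
--         else:
--             perm.append(r if i == 1 - r else i - 2)
--     return perm
-- ===== Notes on version B (the rewrite author's own statement) =====
-- stated objective: faster
-- what changed: Replaces the two-step recursion with append/swap fixups by a single non-recursive pass that fills every position directly from a closed-form parity rule (i+2 on positions of n-1's parity, i-2 on the others, with fixups at the first opposite-parity position and the last position).
import Mathlib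
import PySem

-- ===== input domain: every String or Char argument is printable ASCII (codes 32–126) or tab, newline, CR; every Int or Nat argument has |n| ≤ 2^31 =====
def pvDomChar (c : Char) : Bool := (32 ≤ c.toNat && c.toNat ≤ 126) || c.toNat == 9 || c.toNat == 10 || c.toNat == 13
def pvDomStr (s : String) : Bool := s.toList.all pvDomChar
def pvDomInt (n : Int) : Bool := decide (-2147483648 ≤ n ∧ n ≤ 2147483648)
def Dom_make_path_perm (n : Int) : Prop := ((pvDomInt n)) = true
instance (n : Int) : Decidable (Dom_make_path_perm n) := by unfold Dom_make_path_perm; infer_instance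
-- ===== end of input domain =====

-- B replaces A's recursion (append twice, then two swaps) by one non-recursive pass filling each
-- position from a closed-form parity rule; equivalence is proved for all n ≥ 1 (A raises ValueError for n < 1).

-- ===== PORT A =====
-- helper swap(L, i, j): L[i], L[j] = L[j], L[i]; on an out-of-range index Python would raise
-- IndexError (never reached for the indices A uses on lists of length ≥ 3), modelled by returning L.
def pySwap (L : List Int) (i j : Int) : List Int :=
  match PySem.List.pyIdx? L.length i, PySem.List.pyIdx? L.length j with
  | some ii, some jj => (L.set ii (L.getD jj 0)).set jj (L.getD ii 0)
  | _, _ => L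

def make_path_perm (n : Int) : List Int :=
  if n < 1 then []              -- raise ValueError("no nodes"): excluded by Pre_make_path_perm
  else if n = 1 then [0]
  else if n = 2 then [1, 0]
  else
    let perm := make_path_perm (n - 2)
    let perm := perm ++ [n - 2]     -- perm.append(n-2)
    let perm := perm ++ [n - 1]     -- perm.append(n-1)
    let perm := pySwap perm (-2) (-1)
    pySwap perm (-3) (-2)
termination_by n.toNat
decreasing_by omega

-- ===== PORT B =====
def make_path_perm_alt (n : Int) : List Int :=
  if n < 1 then []              -- raise ValueError("no nodes"): excluded by Pre_make_path_perm
  else if n = 1 then [0]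
  else
    let r := PySem.Int.mod (n - 1) 2
    (PySem.List.pyRange 0 n).foldl
      (fun perm i =>
        if PySem.Int.mod i 2 = r then
          perm ++ [if i = n - 1 then n - 2 else i + 2]
        else
          perm ++ [if i = 1 - r then r else i - 2]) []

-- ===== PRECONDITION & SPEC =====
-- A raises ValueError on every n < 1; Pre_ admits exactly the inputs where A returns.
def Pre_make_path_perm (n : Int) : Prop := 1 ≤ n
instance (n : Int) : Decidable (Pre_make_path_perm n) := by unfold Pre_make_path_perm; infer_instance
def pvWitness_make_path_perm : Int := (5)

def Spec_make_path_perm (n : Int) (out : List Int) : Prop := out = make_path_perm_alt n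
instance (n : Int) (out : List Int) : Decidable (Spec_make_path_perm n out) := by unfold Spec_make_path_perm; infer_instance

-- ===== CLAIM (what is proved, stated in full; the proofs are below) =====
def Claim_equal_make_path_perm : Prop := ∀ (n : Int), Dom_make_path_perm n → Pre_make_path_perm n → Spec_make_path_perm n (make_path_perm n)

-- ===== LEMMAS AND PROOFS =====

-- the closed-form element of B at position i
def pvElem (n r i : Int) : Int :=
  if PySem.Int.mod i 2 = r then (if i = n - 1 then n - 2 else i + 2)
  else (if i = 1 - r then r else i - 2)

def pvG (n : Int) : List Int :=
  (List.range n.toNat).map (fun (k : Nat) => pvElem n (PySem.Int.mod (n - 1) 2) (k : Int))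

def pvH (n : Int) : List Int := if n = 1 then [0] else pvG n

lemma pvSwap_length (L : List Int) (i j : Int) : (pySwap L i j).length = L.length := by
  unfold pySwap
  rcases h1 : PySem.List.pyIdx? L.length i with _ | ii <;>
    rcases h2 : PySem.List.pyIdx? L.length j with _ | jj <;> simp

lemma pySwap_cons (z : Int) (L : List Int) (i j : Int)
    (hi : -(L.length : Int) ≤ i) (hi' : i < 0) (hj : -(L.length : Int) ≤ j) (hj' : j < 0) :
    pySwap (z :: L) i j = z :: pySwap L i j := by
  have hii : PySem.List.pyIdx? (z :: L).length i = some ((L.length - (-i).toNat) + 1) := by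
    simp only [PySem.List.pyIdx?, List.length_cons]
    rw [if_neg (by omega), if_pos (by push_cast; omega)]
    congr 1; omega
  have hjj : PySem.List.pyIdx? (z :: L).length j = some ((L.length - (-j).toNat) + 1) := by
    simp only [PySem.List.pyIdx?, List.length_cons]
    rw [if_neg (by omega), if_pos (by push_cast; omega)]
    congr 1; omega
  have hii' : PySem.List.pyIdx? L.length i = some (L.length - (-i).toNat) := by
    simp only [PySem.List.pyIdx?]
    rw [if_neg (by omega), if_pos (by omega)]
  have hjj' : PySem.List.pyIdx? L.length j = some (L.length - (-j).toNat) := by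
    simp only [PySem.List.pyIdx?]
    rw [if_neg (by omega), if_pos (by omega)]
  unfold pySwap
  rw [hii, hjj, hii', hjj']
  simp

lemma swap_shape (Z : List Int) (a b c : Int) :
    pySwap (pySwap (Z ++ [a, b, c]) (-2) (-1)) (-3) (-2) = Z ++ [c, a, b] := by
  induction Z with
  | nil => rfl
  | cons z Z ih =>
      have hlen : (Z ++ [a, b, c]).length = Z.length + 3 := by simp
      rw [List.cons_append,
          pySwap_cons z (Z ++ [a, b, c]) (-2) (-1) (by rw [hlen]; push_cast; omega) (by omega)
            (by rw [hlen]; push_cast; omega) (by omega),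
          pySwap_cons z _ (-3) (-2) (by rw [pvSwap_length, hlen]; push_cast; omega) (by omega)
            (by rw [pvSwap_length, hlen]; push_cast; omega) (by omega),
          ih, List.cons_append]

lemma pvH_length (n : Int) (_hn : 1 ≤ n) : (pvH n).length = n.toNat := by
  unfold pvH pvG
  split_ifs with h
  · simp [h]
  · simp

lemma pvH_ne_nil (n : Int) (hn : 1 ≤ n) : pvH n ≠ [] := by
  have := pvH_length n hn
  intro h
  rw [h] at this
  simp at this
  omega

lemma pvElem_agree (n i : Int) (_h5 : 5 ≤ n) (h0 : 0 ≤ i) (hi : i < n - 3) :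
    pvElem n (PySem.Int.mod (n - 1) 2) i = pvElem (n - 2) (PySem.Int.mod (n - 2 - 1) 2) i := by
  unfold pvElem
  simp only [PySem.Int.mod_eq_emod_of_pos (show (0:Int) < 2 by norm_num)]
  split_ifs <;> omega

-- recurrence for the closed form: for n ≥ 3, appending and swapping extends pvH (n-2) to pvH n
lemma pvH_step (n : Int) (hn : 3 ≤ n) (X : List Int) (y : Int)
    (hd : pvH (n - 2) = X ++ [y]) : pvH n = X ++ [n - 1, y, n - 2] := by
  by_cases h3 : n = 3
  · have h12 : pvH (n - 2) = [0] := by rw [show n - 2 = 1 from by omega]; decide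
    rw [h12] at hd
    rcases X with _ | ⟨x, xs⟩
    · simp only [List.nil_append] at hd
      have hy : y = 0 := by
        have := List.head_eq_of_cons_eq hd.symm
        omega
      subst h3
      rw [hy]
      decide
    · exfalso
      have := congrArg List.length hd
      simp only [List.length_cons, List.length_append, List.length_nil] at this
      omega
  · by_cases h4 : n = 4
    · have h12 : pvH (n - 2) = [1, 0] := by rw [show n - 2 = 2 from by omega]; decide
      rw [h12] at hd
      rcases X with _ | ⟨x, xs⟩
      · exfalso
        have := congrArg List.length hd
        simp only [List.length_cons, List.length_append, List.length_nil] at this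
        omega
      · rcases xs with _ | ⟨x2, xs2⟩
        · simp only [List.cons_append, List.nil_append, List.cons.injEq, and_true] at hd
          rcases hd with ⟨hx, hy⟩
          subst h4
          rw [show x = 1 from by omega, show y = 0 from by omega]
          decide
        · exfalso
          have := congrArg List.length hd
          simp only [List.length_cons, List.length_append, List.length_nil] at this
          omega
    · -- n ≥ 5
      have h5 : 5 ≤ n := by omega
      obtain ⟨p, hp⟩ : ∃ p : Nat, n.toNat = p + 3 := ⟨n.toNat - 3, by omega⟩
      have hp2 : (n - 2).toNat = p + 1 := by omega
      have hH2 : pvH (n - 2) = pvG (n - 2) := by unfold pvH; rw [if_neg (by omega)]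
      have hHn : pvH n = pvG n := by unfold pvH; rw [if_neg (by omega)]
      have hG2 : pvG (n - 2) =
          (List.range p).map (fun (k : Nat) => pvElem (n - 2) (PySem.Int.mod (n - 2 - 1) 2) (k : Int))
            ++ [pvElem (n - 2) (PySem.Int.mod (n - 2 - 1) 2) (p : Int)] := by
        unfold pvG
        rw [hp2, List.range_succ]
        simp
      have hXy : X = (List.range p).map
            (fun (k : Nat) => pvElem (n - 2) (PySem.Int.mod (n - 2 - 1) 2) (k : Int))
          ∧ y = pvElem (n - 2) (PySem.Int.mod (n - 2 - 1) 2) (p : Int) := by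
        have hd' : pvG (n - 2) = X ++ [y] := by rw [← hH2]; exact hd
        have := hd'.symm.trans hG2
        have h := List.append_inj' this (by simp)
        exact ⟨h.1, by simpa using h.2⟩
      rcases hXy with ⟨hX, hy⟩
      subst hX; subst hy
      rw [hHn]
      unfold pvG
      rw [hp, show p + 3 = (p + 2) + 1 from rfl, List.range_succ,
          show p + 2 = (p + 1) + 1 from rfl, List.range_succ, List.range_succ]
      have hpn : (p : Int) = n - 3 := by omega
      have e1 : pvElem n (PySem.Int.mod (n - 1) 2) (p : Int) = n - 1 := by
        unfold pvElem
        simp only [PySem.Int.mod_eq_emod_of_pos (show (0:Int) < 2 by norm_num)]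
        rw [hpn]
        split_ifs <;> omega
      have e2 : pvElem n (PySem.Int.mod (n - 1) 2) ((p : Int) + 1) = pvElem (n - 2) (PySem.Int.mod (n - 2 - 1) 2) (p : Int) := by
        unfold pvElem
        simp only [PySem.Int.mod_eq_emod_of_pos (show (0:Int) < 2 by norm_num)]
        rw [hpn]
        split_ifs <;> omega
      have e3 : pvElem n (PySem.Int.mod (n - 1) 2) ((p : Int) + 1 + 1) = n - 2 := by
        unfold pvElem
        simp only [PySem.Int.mod_eq_emod_of_pos (show (0:Int) < 2 by norm_num)]
        rw [hpn]
        split_ifs <;> omega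
      have hmap : (List.range p).map (fun (k : Nat) => pvElem n (PySem.Int.mod (n - 1) 2) (k : Int))
          = (List.range p).map (fun (k : Nat) => pvElem (n - 2) (PySem.Int.mod (n - 2 - 1) 2) (k : Int)) := by
        apply List.map_congr_left
        intro k hk
        have hkp : k < p := List.mem_range.mp hk
        exact pvElem_agree n (k : Int) h5 (by omega) (by omega)
      simp only [List.map_append, List.map_cons, List.map_nil]
      push_cast
      rw [e1, e2, e3, hmap]
      simp

lemma A_eq_H : ∀ (m : Nat) (n : Int), n.toNat = m → 1 ≤ n → make_path_perm n = pvH n := by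
  intro m
  induction m using Nat.strong_induction_on with
  | _ m ih =>
    intro n hm hn
    rw [make_path_perm]
    by_cases h1 : n = 1
    · subst h1; decide
    · by_cases h2 : n = 2
      · subst h2; decide
      · rw [if_neg (by omega), if_neg h1, if_neg h2]
        have h3 : 3 ≤ n := by omega
        have ihA : make_path_perm (n - 2) = pvH (n - 2) :=
          ih (n - 2).toNat (by omega) (n - 2) rfl (by omega)
        have hne := pvH_ne_nil (n - 2) (by omega)
        have hd : pvH (n - 2) = (pvH (n - 2)).dropLast ++ [(pvH (n - 2)).getLast hne] :=
          (List.dropLast_append_getLast hne).symm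
        show pySwap (pySwap ((make_path_perm (n - 2) ++ [n - 2]) ++ [n - 1]) (-2) (-1)) (-3) (-2)
            = pvH n
        rw [ihA, hd, List.append_assoc, List.append_assoc]
        rw [show [n - 2] ++ [n - 1] = [n - 2, n - 1] from rfl,
            show ([(pvH (n - 2)).getLast hne] ++ [n - 2, n - 1] : List Int)
              = [(pvH (n - 2)).getLast hne, n - 2, n - 1] from rfl]
        rw [swap_shape]
        rw [pvH_step n h3 (pvH (n - 2)).dropLast ((pvH (n - 2)).getLast hne) hd]

lemma B_eq_H (n : Int) (hn : 1 ≤ n) : make_path_perm_alt n = pvH n := by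
  unfold make_path_perm_alt
  rw [if_neg (by omega)]
  by_cases h1 : n = 1
  · subst h1; decide
  · rw [if_neg h1]
    unfold pvH
    rw [if_neg h1]
    show (PySem.List.pyRange 0 n).foldl
        (fun perm i =>
          if PySem.Int.mod i 2 = PySem.Int.mod (n - 1) 2 then
            perm ++ [if i = n - 1 then n - 2 else i + 2]
          else
            perm ++ [if i = 1 - PySem.Int.mod (n - 1) 2 then PySem.Int.mod (n - 1) 2 else i - 2]) []
        = pvG n
    have hlam : (fun (perm : List Int) (i : Int) =>
        if PySem.Int.mod i 2 = PySem.Int.mod (n - 1) 2 then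
          perm ++ [if i = n - 1 then n - 2 else i + 2]
        else
          perm ++ [if i = 1 - PySem.Int.mod (n - 1) 2 then PySem.Int.mod (n - 1) 2 else i - 2])
        = (fun perm i => perm ++ [pvElem n (PySem.Int.mod (n - 1) 2) i]) := by
      funext perm i
      unfold pvElem
      split_ifs <;> rfl
    rw [hlam]
    have hcast : PySem.List.pyRange 0 n = (List.range n.toNat).map (fun (k : Nat) => (k : Int)) := by
      have h : ((n.toNat : Nat) : Int) = n := by omega
      conv_lhs => rw [← h]
      exact PySem.List.pyRange_zero_natCast n.toNat
    rw [hcast, List.foldl_map, PySem.List.foldl_append_singleton_eq_map]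
    unfold pvG
    simp

-- ===== VERDICT (by name: the statement is the Claim_ definition above) =====
theorem make_path_perm_spec : Claim_equal_make_path_perm := by
  intro n _ hpre
  unfold Spec_make_path_perm
  rw [A_eq_H n.toNat n rfl hpre, B_eq_H n hpre]
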